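-- pv_equiv track=rewrite | github.com/arnabs542/data_structure_and_algorithm_practice | recursion/backtracking_template.py | is_shrinkable
-- ===== SOURCE A (Python) =====
-- def is_shrinkable(word, lexicon):
--     if len(word) == 1:
--         return True
--     else:
--         for letter in range(len(word)):
--             shrunken_word = word[:letter] + word[letter+1:]
--             if shrunken_word in lexicon and is_shrinkable(shrunken_word, lexicon):
--                 return True
--     return False
-- ===== SOURCE B (Python) =====
-- def is_shrinkable(word, lexicon):
--     n = len(word)
--     if n == 1:
--         return True
--     # bottom-up: scan lexicon words in order of increasing length, collecting the
--     # shrinkable ones in a set, then test the one-letter deletions of word against it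
--     good = set()
--     for w in sorted(lexicon, key=len):
--         k = len(w)
--         if 1 <= k < n and (k == 1 or any(w[:i] + w[i+1:] in good for i in range(k))):
--             good.add(w)
--     return any(word[:i] + word[i+1:] in good for i in range(n))
-- ===== Notes on version B (the rewrite author's own statement) =====
-- stated objective: alternative
-- what changed: Replaced the top-down recursion over one-letter deletions by a bottom-up dynamic program: lexicon words are scanned once in order of increasing length, the shrinkable ones are collected in a hash set, and the word's deletions are tested against that set.
import Mathlib
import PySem

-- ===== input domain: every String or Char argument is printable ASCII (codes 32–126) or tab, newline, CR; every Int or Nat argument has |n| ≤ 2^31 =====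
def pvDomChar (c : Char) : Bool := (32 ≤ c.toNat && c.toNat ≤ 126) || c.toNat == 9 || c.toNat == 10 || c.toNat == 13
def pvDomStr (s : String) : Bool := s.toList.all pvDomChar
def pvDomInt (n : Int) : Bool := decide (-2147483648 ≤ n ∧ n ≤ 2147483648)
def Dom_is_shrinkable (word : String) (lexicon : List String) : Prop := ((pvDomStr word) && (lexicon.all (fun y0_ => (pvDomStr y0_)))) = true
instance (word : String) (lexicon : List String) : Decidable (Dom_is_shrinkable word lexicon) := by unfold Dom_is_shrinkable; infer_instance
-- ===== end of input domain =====

-- B replaces A's top-down recursion over deletions by a bottom-up pass over the lexicon sorted by length; equivalence proved on all inputs.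


-- ===== PORT A =====
-- word[:letter] + word[letter+1:] with 0 ≤ letter < len(word) is exactly take letter ++ drop (letter+1)
def shrinkA (lexicon : List String) (l : List Char) : Bool :=
  if l.length = 1 then true
  else
    (List.range l.length).attach.any (fun p =>
      lexicon.contains (String.ofList (l.take p.1 ++ l.drop (p.1 + 1))) &&
      shrinkA lexicon (l.take p.1 ++ l.drop (p.1 + 1)))
termination_by l.length
decreasing_by
  have := List.mem_range.mp p.2
  simp only [List.length_append, List.length_take, List.length_drop]
  omega

def is_shrinkable (word : String) (lexicon : List String) : Bool :=
  shrinkA lexicon word.toList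

-- ===== PORT B =====
-- the body of B's 'for w in sorted(lexicon, key=len)' loop
def stepB (n : Nat) (g : PySem.Set String) (w : String) : PySem.Set String :=
  if (1 ≤ w.toList.length ∧ w.toList.length < n) ∧
      (w.toList.length = 1 ∨ (List.range w.toList.length).any (fun i =>
        PySem.Set.contains g (String.ofList (w.toList.take i ++ w.toList.drop (i + 1)))))
  then PySem.Set.add g w else g

def is_shrinkable_alt (word : String) (lexicon : List String) : Bool :=
  let l := word.toList
  let n := l.length
  if n = 1 then true
  else
    let good := (PySem.List.sorted lexicon (fun w => (w.toList.length : Int)) false).foldl (stepB n) PySem.Set.empty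
    (List.range n).any (fun i =>
      PySem.Set.contains good (String.ofList (l.take i ++ l.drop (i + 1))))

-- ===== PRECONDITION & SPEC =====
def Spec_is_shrinkable (word : String) (lexicon : List String) (out : Bool) : Prop := out = is_shrinkable_alt word lexicon
instance (word : String) (lexicon : List String) (out : Bool) : Decidable (Spec_is_shrinkable word lexicon out) := by unfold Spec_is_shrinkable; infer_instance

-- ===== CLAIM (what is proved, stated in full; the proofs are below) =====
def Claim_equal_is_shrinkable : Prop := ∀ (word : String) (lexicon : List String), Dom_is_shrinkable word lexicon → Spec_is_shrinkable word lexicon (is_shrinkable word lexicon)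

-- ===== LEMMAS AND PROOFS =====

theorem shrinkA_iff (lexicon : List String) (l : List Char) :
    shrinkA lexicon l = true ↔
      (l.length = 1 ∨ ∃ i < l.length,
        String.ofList (l.take i ++ l.drop (i + 1)) ∈ lexicon ∧
        shrinkA lexicon (l.take i ++ l.drop (i + 1)) = true) := by
  rw [shrinkA]
  split_ifs with h
  · simp [h]
  · simp only [h, false_or]
    simp only [List.any_eq_true, List.mem_attach, true_and, Bool.and_eq_true,
      List.contains_iff_mem]
    constructor
    · rintro ⟨⟨i, hi⟩, h1, h2⟩
      exact ⟨i, List.mem_range.mp hi, h1, h2⟩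
    · rintro ⟨i, hi, h1, h2⟩
      exact ⟨⟨i, List.mem_range.mpr hi⟩, h1, h2⟩

theorem del_len {w : List Char} {i k : Nat} (hi : i < k) (hw : w.length = k) :
    (w.take i ++ w.drop (i + 1)).length = k - 1 := by
  simp only [List.length_append, List.length_take, List.length_drop]
  omega

-- B's add-condition decides exactly "1 ≤ |w| < n and A finds w shrinkable", provided
-- g holds exactly the already-processed shrinkable words and every lexicon word
-- strictly shorter than w is already processed
theorem condB_iff (lexicon : List String) (n : Nat) (done : List String) (g : PySem.Set String)
    (hsub : ∀ u ∈ done, u ∈ lexicon)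
    (hg : ∀ s : String, s ∈ g ↔
      (s ∈ done ∧ 1 ≤ s.toList.length ∧ s.toList.length < n ∧ shrinkA lexicon s.toList = true))
    (w : String)
    (hshort : ∀ u ∈ lexicon, u.toList.length < w.toList.length → u ∈ done) :
    (((1 ≤ w.toList.length ∧ w.toList.length < n) ∧
      (w.toList.length = 1 ∨ (List.range w.toList.length).any (fun i =>
        PySem.Set.contains g (String.ofList (w.toList.take i ++ w.toList.drop (i + 1)))) = true))
      ↔ ((1 ≤ w.toList.length ∧ w.toList.length < n) ∧ shrinkA lexicon w.toList = true)) := by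
  constructor
  · rintro ⟨hb, hc⟩
    refine ⟨hb, ?_⟩
    rw [shrinkA_iff]
    rcases hc with hk1 | hc
    · exact Or.inl hk1
    · simp only [List.any_eq_true, List.mem_range] at hc
      obtain ⟨i, hi, hcon⟩ := hc
      have hmem := ((hg _).mp ((PySem.Set.contains_iff _ _).mp hcon))
      rcases hmem with ⟨h1, _, _, h4⟩
      rw [String.toList_ofList] at h4
      exact Or.inr ⟨i, hi, hsub _ h1, h4⟩
  · rintro ⟨hb, hA⟩
    refine ⟨hb, ?_⟩
    rw [shrinkA_iff] at hA
    rcases hA with hk1 | ⟨i, hi, h1, h2⟩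
    · exact Or.inl hk1
    · refine Or.inr ?_
      simp only [List.any_eq_true, List.mem_range]
      refine ⟨i, hi, ?_⟩
      rw [PySem.Set.contains_iff, hg]
      have hlen : (String.ofList (w.toList.take i ++ w.toList.drop (i + 1))).toList.length
          = w.toList.length - 1 := by
        rw [String.toList_ofList]; exact del_len hi rfl
      refine ⟨?_, ?_, ?_, ?_⟩
      · exact hshort _ h1 (by omega)
      · -- a word in the lexicon that A recursed into has length ≥ 1: its index set was non-empty…
        -- here directly: |del| = |w| - 1 and the deletion is shrinkable, so |del| ≥ 1 unless |w| ≤ 1;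
        -- |w| ≥ 1 from hb, and |w| = 1 is excluded since i < |w| and the deletion shrinkable of length 0 is not
        by_cases h0 : w.toList.length - 1 = 0
        · exfalso
          rw [shrinkA_iff] at h2
          rcases h2 with hlen1 | ⟨j, hj, _⟩
          · rw [del_len hi rfl] at hlen1; omega
          · rw [del_len hi rfl] at hj; omega
        · omega
      · omega
      · rw [String.toList_ofList]; exact h2

-- invariant of B's single pass: after processing 'done' (a length-sorted prefix of a
-- permutation of the lexicon), g holds exactly the processed words of length 1..n-1
-- that A finds shrinkable
theorem foldB_inv (lexicon : List String) (n : Nat) :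
    ∀ (rest done : List String) (g : PySem.Set String),
    (done ++ rest).Perm lexicon →
    (done ++ rest).Pairwise (fun a b => a.toList.length ≤ b.toList.length) →
    (∀ s : String, s ∈ g ↔
      (s ∈ done ∧ 1 ≤ s.toList.length ∧ s.toList.length < n ∧ shrinkA lexicon s.toList = true)) →
    (∀ s : String, s ∈ rest.foldl (stepB n) g ↔
      (s ∈ lexicon ∧ 1 ≤ s.toList.length ∧ s.toList.length < n ∧ shrinkA lexicon s.toList = true)) := by
  intro rest
  induction rest with
  | nil =>
    intro done g hperm _ hg s
    simp only [List.foldl_nil]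
    rw [hg]
    simp only [List.append_nil] at hperm
    rw [hperm.mem_iff]
  | cons w rest ih =>
    intro done g hperm hpw hg s
    simp only [List.foldl_cons]
    have hsub : ∀ u ∈ done, u ∈ lexicon := fun u hu =>
      hperm.mem_iff.mp (List.mem_append_left _ hu)
    have hshort : ∀ u ∈ lexicon, u.toList.length < w.toList.length → u ∈ done := by
      intro u hu hlt
      have : u ∈ done ++ w :: rest := hperm.symm.mem_iff.mp hu
      rcases List.mem_append.mp this with h | h
      · exact h
      · rcases List.mem_cons.mp h with rfl | h
        · omega
        · -- u comes after w in the sorted list, so |w| ≤ |u|: contradiction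
          exfalso
          have hcross := List.pairwise_cons.mp (List.pairwise_append.mp hpw).2.1
          exact absurd (hcross.1 u h) (by omega)
    have hcond := condB_iff lexicon n done g hsub hg w hshort
    have hperm' : ((done ++ [w]) ++ rest).Perm lexicon := by
      rw [List.append_assoc]; exact hperm
    have hpw' : ((done ++ [w]) ++ rest).Pairwise (fun a b => a.toList.length ≤ b.toList.length) := by
      rw [List.append_assoc]; exact hpw
    unfold stepB
    split_ifs with hc
    · -- w is added
      have hAw := hcond.mp hc
      refine ih (done ++ [w]) (PySem.Set.add g w) hperm' hpw' ?_ s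
      intro t
      rw [PySem.Set.mem_add _ _ _, hg]
      constructor
      · rintro (⟨h1, h2, h3, h4⟩ | rfl)
        · exact ⟨List.mem_append_left _ h1, h2, h3, h4⟩
        · exact ⟨List.mem_append_right _ (List.mem_singleton_self _),
            hAw.1.1, hAw.1.2, hAw.2⟩
      · rintro ⟨h1, h2, h3, h4⟩
        rcases List.mem_append.mp h1 with h | h
        · exact Or.inl ⟨h, h2, h3, h4⟩
        · exact Or.inr (List.mem_singleton.mp h)
    · -- w is not added: it fails the (equivalent) shrinkability test
      refine ih (done ++ [w]) g hperm' hpw' ?_ s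
      intro t
      rw [hg]
      constructor
      · rintro ⟨h1, h2, h3, h4⟩
        exact ⟨List.mem_append_left _ h1, h2, h3, h4⟩
      · rintro ⟨h1, h2, h3, h4⟩
        rcases List.mem_append.mp h1 with h | h
        · exact ⟨h, h2, h3, h4⟩
        · rcases List.mem_singleton.mp h with rfl
          exact absurd (hcond.mpr ⟨⟨h2, h3⟩, h4⟩) hc

-- B's good set holds exactly the lexicon words of length 1..n-1 that A finds shrinkable
theorem goodB (lexicon : List String) (n : Nat) :
    ∀ s : String,
      s ∈ (PySem.List.sorted lexicon (fun w => (w.toList.length : Int)) false).foldl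
            (stepB n) PySem.Set.empty ↔
      (s ∈ lexicon ∧ 1 ≤ s.toList.length ∧ s.toList.length < n ∧ shrinkA lexicon s.toList = true) := by
  have hperm : ([] ++ PySem.List.sorted lexicon (fun w => (w.toList.length : Int)) false).Perm lexicon := by
    simpa using PySem.List.sorted_perm lexicon (fun w => (w.toList.length : Int)) false
  have hpw : ([] ++ PySem.List.sorted lexicon (fun w => (w.toList.length : Int)) false).Pairwise
      (fun a b : String => a.toList.length ≤ b.toList.length) := by
    simp only [List.nil_append]
    exact (PySem.List.sorted_pairwise lexicon (fun w => (w.toList.length : Int))).imp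
      (fun h => by exact_mod_cast h)
  exact foldB_inv lexicon n _ [] PySem.Set.empty hperm hpw
    (fun s => by simp [PySem.Set.empty])

-- ===== VERDICT (by name: the statement is the Claim_ definition above) =====
theorem is_shrinkable_spec : Claim_equal_is_shrinkable := by
  intro word lexicon _
  unfold Spec_is_shrinkable is_shrinkable is_shrinkable_alt
  by_cases h : word.toList.length = 1
  · rw [shrinkA]
    simp [h]
  · simp only [h, ite_false]
    rw [Bool.eq_iff_iff, shrinkA_iff]
    simp only [h, false_or, List.any_eq_true, List.mem_range, PySem.Set.contains_iff]
    constructor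
    · rintro ⟨i, hi, h1, h2⟩
      refine ⟨i, hi, ?_⟩
      rw [goodB]
      have hlen := del_len hi rfl
      refine ⟨h1, ?_, ?_, ?_⟩
      · rw [String.toList_ofList, hlen]; omega
      · rw [String.toList_ofList, hlen]; omega
      · rw [String.toList_ofList]; exact h2
    · rintro ⟨i, hi, hmem⟩
      rw [goodB] at hmem
      rcases hmem with ⟨h1, _, _, h4⟩
      rw [String.toList_ofList] at h4
      exact ⟨i, hi, h1, h4⟩
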